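-- pv_equiv track=rewrite | github.com/trucni2005/Speech-Emotion-Recognition | modules/training_and_fine_tuning/training/feature_selector.py | generate_feature_combinations
-- ===== SOURCE A (Python) =====
-- from itertools import combinations
--
-- def generate_feature_combinations(features):
--     n = len(features)
--     all_combinations = []
--     for r in range(n-2):
--         for combo in combinations(range(n), r):
--             selected_features = [features[i] for i in range(n) if i not in combo]
--             all_combinations.append(selected_features)
--     return all_combinations
-- ===== SOURCE B (Python) =====
-- def _combos_rev(xs, k):
--     # all k-element combinations of xs, in reverse lexicographic (positional) order
--     if k == 0:
--         return [[]]
--     if not xs: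
--         return []
--     head, rest = xs[0], xs[1:]
--     return _combos_rev(rest, k) + [[head] + c for c in _combos_rev(rest, k - 1)]
--
-- def generate_feature_combinations(features):
--     out = []
--     for size in range(len(features), 2, -1):
--         out.extend(_combos_rev(features, size))
--     return out
-- ===== Notes on version B (the rewrite author's own statement) =====
-- stated objective: alternative
-- what changed: A enumerates excluded index r-subsets and rebuilds each kept list by filtering range(n) with a membership test; B loops over kept sizes n..3 descending and emits each kept list directly via a recursive reverse-lex combination generator over the features themselves, with no index sets, no filtering and no membership tests.
import Mathlib
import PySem

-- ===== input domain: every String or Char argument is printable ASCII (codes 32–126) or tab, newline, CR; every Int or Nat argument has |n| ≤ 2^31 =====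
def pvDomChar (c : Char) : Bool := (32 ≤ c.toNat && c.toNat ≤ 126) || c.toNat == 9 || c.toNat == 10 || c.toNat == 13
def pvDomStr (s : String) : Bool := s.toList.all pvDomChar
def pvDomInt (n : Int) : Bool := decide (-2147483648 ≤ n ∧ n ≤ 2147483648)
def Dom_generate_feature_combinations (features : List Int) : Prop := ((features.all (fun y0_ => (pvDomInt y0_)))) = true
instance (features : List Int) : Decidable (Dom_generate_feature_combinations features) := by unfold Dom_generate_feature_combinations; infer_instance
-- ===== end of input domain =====

-- B loops over kept sizes n..3 descending and emits each kept list directly with a recursive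
-- reverse-lexicographic generator over the features; no index subsets, no filtering.

-- ===== PORT A =====
-- itertools.combinations over a list, in Python's lexicographic emission order (exact).
def pyCombinations {α : Type} : List α → Nat → List (List α)
  | _, 0 => [[]]
  | [], _ + 1 => []
  | x :: t, k + 1 => (pyCombinations t k).map (fun c => x :: c) ++ pyCombinations t (k + 1)

def generate_feature_combinations (features : List Int) : List (List Int) :=
  let n : Int := features.length
  -- r comes from range(n-2) so r ≥ 0 and r.toNat is exact; features[i] always in range.
  (PySem.List.pyRange 0 (n - 2) 1).foldl (fun acc r =>
    (pyCombinations (PySem.List.pyRange 0 n 1) r.toNat).foldl (fun acc2 combo =>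
      acc2 ++ [((PySem.List.pyRange 0 n 1).filter (fun i => !combo.contains i)).map
                 (fun i => PySem.List.pyGetD features i 0)]) acc) []

-- ===== PORT B =====
-- Source B's _combos_rev: k-element combinations in reverse lexicographic (positional) order.
def combosRev : List Int → Nat → List (List Int)
  | _, 0 => [[]]
  | [], _ + 1 => []
  | head :: rest, k + 1 =>
      combosRev rest (k + 1) ++ (combosRev rest k).map (fun c => head :: c)

def generate_feature_combinations_alt (features : List Int) : List (List Int) :=
  -- size comes from range(n, 2, -1) so size ≥ 3 and size.toNat is exact.
  (PySem.List.pyRange (features.length : Int) 2 (-1)).foldl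
    (fun out size => out ++ combosRev features size.toNat) []

-- ===== PRECONDITION & SPEC =====
def Spec_generate_feature_combinations (features : List Int) (out : List (List Int)) : Prop := out = generate_feature_combinations_alt features
instance (features : List Int) (out : List (List Int)) : Decidable (Spec_generate_feature_combinations features out) := by unfold Spec_generate_feature_combinations; infer_instance

-- ===== CLAIM (what is proved, stated in full; the proofs are below) =====
def Claim_equal_generate_feature_combinations : Prop := ∀ (features : List Int), Dom_generate_feature_combinations features → Spec_generate_feature_combinations features (generate_feature_combinations features)

-- ===== LEMMAS AND PROOFS =====

theorem pyCombinations_eq_nil {α : Type} (xs : List α) (k : Nat) (h : xs.length < k) :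
    pyCombinations xs k = [] := by
  induction xs generalizing k with
  | nil => cases k with
    | zero => simp at h
    | succ k => rfl
  | cons x t ih =>
    cases k with
    | zero => simp at h
    | succ k =>
      simp only [List.length_cons, Nat.succ_lt_succ_iff] at h
      simp [pyCombinations, ih k h, ih (k+1) (Nat.lt_succ_of_lt h)]

theorem pyCombinations_self {α : Type} (xs : List α) :
    pyCombinations xs xs.length = [xs] := by
  induction xs with
  | nil => rfl
  | cons x t ih =>
    simp [pyCombinations, ih, pyCombinations_eq_nil t (t.length + 1) (Nat.lt_succ_self _)]

theorem pyCombinations_subset {α : Type} {xs : List α} {k : Nat} {c : List α}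
    (h : c ∈ pyCombinations xs k) : ∀ a ∈ c, a ∈ xs := by
  induction xs generalizing k c with
  | nil =>
    cases k with
    | zero => simp [pyCombinations] at h; simp [h]
    | succ k => simp [pyCombinations] at h
  | cons x t ih =>
    cases k with
    | zero =>
      simp [pyCombinations] at h; simp [h]
    | succ k =>
      simp only [pyCombinations, List.mem_append, List.mem_map] at h
      rcases h with ⟨c', hc', rfl⟩ | h
      · intro a ha
        rcases List.mem_cons.mp ha with rfl | ha
        · exact List.mem_cons_self
        · exact List.mem_cons_of_mem _ (ih hc' a ha)
      · intro a ha
        exact List.mem_cons_of_mem _ (ih h a ha)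

theorem pyCombinations_map {α β : Type} (f : α → β) (xs : List α) (k : Nat) :
    (pyCombinations xs k).map (List.map f) = pyCombinations (xs.map f) k := by
  induction xs generalizing k with
  | nil => cases k <;> rfl
  | cons x t ih =>
    cases k with
    | zero => rfl
    | succ k =>
      simp only [pyCombinations, List.map_append, List.map_map, List.map_cons]
      rw [← ih k, ← ih (k+1)]
      simp [Function.comp]

-- B's recursive generator is exactly reversed lexicographic combinations
theorem combosRev_eq_reverse (xs : List Int) (k : Nat) :
    combosRev xs k = (pyCombinations xs k).reverse := by
  induction xs generalizing k with
  | nil => cases k <;> rfl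
  | cons x t ih =>
    cases k with
    | zero => rfl
    | succ k =>
      simp [combosRev, pyCombinations, ih, List.map_reverse]

-- complements of the lex-ordered k-subsets are the lex-ordered (length-k)-subsets, reversed
theorem pyCombinations_compl {xs : List Int} (hnd : xs.Nodup) {k : Nat} (hk : k ≤ xs.length) :
    (pyCombinations xs k).map (fun c => xs.filter (fun a => !c.contains a))
      = (pyCombinations xs (xs.length - k)).reverse := by
  induction xs generalizing k with
  | nil =>
    have hk0 : k = 0 := Nat.le_zero.mp hk
    subst hk0
    simp [pyCombinations]
  | cons x t ih =>
    rcases List.nodup_cons.mp hnd with ⟨hx, hndt⟩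
    cases k with
    | zero =>
      rw [Nat.sub_zero, pyCombinations_self (x :: t)]
      simp [pyCombinations]
    | succ k =>
      have hk' : k ≤ t.length := by simpa [Nat.succ_le_succ_iff] using hk
      simp only [pyCombinations, List.map_append, List.map_map]
      have h1 : ((pyCombinations t k).map ((fun c => (x :: t).filter (fun a => !c.contains a)) ∘ (fun c => x :: c)))
          = (pyCombinations t k).map (fun c => t.filter (fun a => !c.contains a)) := by
        apply List.map_congr_left
        intro c _
        simp only [Function.comp_apply, List.filter_cons]
        have hxc : ((x :: c).contains x) = true := by simp
        rw [hxc]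
        simp only [Bool.not_true, Bool.false_eq_true, if_false]
        apply List.filter_congr
        intro a ha
        have hax : a ≠ x := fun h => hx (h ▸ ha)
        simp [hax]
      have h2 : ((pyCombinations t (k + 1)).map (fun c => (x :: t).filter (fun a => !c.contains a)))
          = ((pyCombinations t (k + 1)).map (fun c => t.filter (fun a => !c.contains a))).map (fun c => x :: c) := by
        rw [List.map_map]
        apply List.map_congr_left
        intro c hc
        have hxc : ((c : List Int).contains x) = false := by
          by_contra hcon
          have : x ∈ c := by
            have := Bool.not_eq_false _ |>.mp hcon
            simpa using this
          exact hx (pyCombinations_subset hc x this)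
        simp only [List.filter_cons, hxc]
        simp
      rw [h1, h2, ih hndt hk']
      rcases Nat.lt_or_ge k t.length with hlt | hge
      · have hk1 : k + 1 ≤ t.length := hlt
        rw [ih hndt hk1]
        have hsub : t.length - k = (t.length - (k + 1)) + 1 := by omega
        have hsub2 : (x :: t).length - (k + 1) = t.length - k := by simp
        rw [hsub2, hsub]
        simp only [pyCombinations, List.reverse_append]
        simp [List.map_reverse]
      · have hkt : k = t.length := le_antisymm hk' hge
        subst hkt
        rw [pyCombinations_eq_nil t (t.length + 1) (Nat.lt_succ_self _)]
        have h0 : (x :: t).length - (t.length + 1) = 0 := by simp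
        rw [h0]
        have h0' : t.length - t.length = 0 := by omega
        rw [h0']
        simp [pyCombinations]

-- the A-side kept list is the complement, mapped through features[·]
theorem inner_eq (features : List Int) (r : Int) (hr0 : 0 ≤ r)
    (hrn : r < (features.length : Int) - 2) :
    (pyCombinations (PySem.List.pyRange 0 (features.length : Int) 1) r.toNat).map
      (fun combo => ((PySem.List.pyRange 0 (features.length : Int) 1).filter (fun i => !combo.contains i)).map
        (fun i => PySem.List.pyGetD features i 0))
      = (pyCombinations features ((features.length : Int) - r).toNat).reverse := by
  set n : Int := (features.length : Int) with hn
  set idx : List Int := PySem.List.pyRange 0 n 1 with hidx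
  have hlen : idx.length = features.length := by
    rw [hidx, PySem.List.length_pyRange_one]; simp [hn]
  have hnd : idx.Nodup := by rw [hidx]; exact PySem.List.nodup_pyRange_one 0 n
  have hk : r.toNat ≤ idx.length := by rw [hlen]; omega
  have step1 : (pyCombinations idx r.toNat).map
      (fun combo => (idx.filter (fun i => !combo.contains i)).map (fun i => PySem.List.pyGetD features i 0))
      = ((pyCombinations idx (idx.length - r.toNat)).reverse).map (List.map (fun i => PySem.List.pyGetD features i 0)) := by
    rw [← pyCombinations_compl hnd hk, List.map_map]
    rfl
  rw [step1, List.map_reverse, pyCombinations_map]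
  have hmap : idx.map (fun i => PySem.List.pyGetD features i 0) = features := by
    rw [hidx, hn]
    exact PySem.List.map_pyGetD_pyRange_zero' features 0
  rw [hmap]
  congr 2
  rw [hlen]
  omega

-- ===== VERDICT (by name: the statement is the Claim_ definition above) =====
theorem generate_feature_combinations_spec : Claim_equal_generate_feature_combinations := by
  intro features _
  unfold Spec_generate_feature_combinations generate_feature_combinations generate_feature_combinations_alt
  set n : Int := (features.length : Int) with hn
  -- both sides as flatMaps over List.range (n-2).toNat
  have hA : (PySem.List.pyRange 0 (n - 2) 1).foldl (fun acc r =>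
      (pyCombinations (PySem.List.pyRange 0 n 1) r.toNat).foldl (fun acc2 combo =>
        acc2 ++ [((PySem.List.pyRange 0 n 1).filter (fun i => !combo.contains i)).map
                   (fun i => PySem.List.pyGetD features i 0)]) acc) []
      = (PySem.List.pyRange 0 (n - 2) 1).flatMap
          (fun r => (pyCombinations features (n - r).toNat).reverse) := by
    rw [PySem.List.foldl_congr_mem' (g := fun acc r =>
          acc ++ (pyCombinations features (n - r).toNat).reverse)]
    · rw [PySem.List.foldl_append_eq_flatMap]; simp
    · intro r hr acc
      rw [PySem.List.foldl_append_singleton_eq_map]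
      rcases PySem.List.mem_pyRange_one.mp hr with ⟨hr0, hrn⟩
      rw [inner_eq features r hr0 hrn]
  rw [hA, PySem.List.foldl_congr_mem' (g := fun out size =>
        out ++ (pyCombinations features size.toNat).reverse)]
  · rw [PySem.List.foldl_append_eq_flatMap, List.nil_append,
       PySem.List.pyRange_one, PySem.List.pyRange_neg_one]
    simp only [List.flatMap_map, Int.sub_zero, Int.zero_add]
  · intro size _ out
    rw [combosRev_eq_reverse]
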